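-- pv_equiv track=rewrite | github.com/zyishai/zipper-home-exercise-solution | limit-similarities.py | limit_consecutive_characters
-- ===== SOURCE A (Python) =====
-- def limit_consecutive_characters(input_str, max_consec_chars):
--   if type(input_str) != str:
--     return input_str
--
--   result = ''
--
--   for char in input_str: # O(n)
--     for i in range(max_consec_chars): # O(1)
--       if len(result) < i + 1 or result[-1 - i] != char:
--         result += char
--         break
--
--   return result
-- ===== SOURCE B (Python) =====
-- def limit_consecutive_characters(input_str, max_consec_chars):
--     if type(input_str) != str:
--         return input_str
--
--     out = []
--     prev = None
--     run = 0
--     for ch in input_str: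
--         if ch != prev:
--             run = 0
--         prev = ch
--         if run < max_consec_chars:
--             out.append(ch)
--             run += 1
--     return ''.join(out)
-- ===== Notes on version B (the rewrite author's own statement) =====
-- stated objective: faster
-- what changed: Replaces A's per-character rescan of the result's tail (indexing result[-1-i] for i in range(max)) with a single pass that keeps the previous character and a capped run-length counter, appending only while the counter is below the limit.
import Mathlib
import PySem

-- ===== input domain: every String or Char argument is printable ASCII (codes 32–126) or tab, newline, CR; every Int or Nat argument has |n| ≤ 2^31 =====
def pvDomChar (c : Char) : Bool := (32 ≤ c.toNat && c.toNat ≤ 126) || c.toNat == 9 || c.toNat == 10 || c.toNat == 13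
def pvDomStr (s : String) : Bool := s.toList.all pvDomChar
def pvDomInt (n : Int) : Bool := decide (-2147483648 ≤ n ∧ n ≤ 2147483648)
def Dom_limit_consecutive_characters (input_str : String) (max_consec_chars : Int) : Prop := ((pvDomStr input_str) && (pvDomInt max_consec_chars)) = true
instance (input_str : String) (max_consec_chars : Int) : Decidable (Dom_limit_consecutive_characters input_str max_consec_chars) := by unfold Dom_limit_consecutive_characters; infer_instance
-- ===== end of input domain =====

-- B is a single pass keeping a run-length counter instead of re-scanning the tail of the result
-- for every character (objective: faster; A's return value is reproduced exactly, including '' for max ≤ 0).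

-- ===== PORT A =====
-- inner loop 'for i in range(max_consec_chars): if len(result) < i + 1 or result[-1 - i] != char: result += char; break'
-- (iteration variable i counts up and the loop BREAKS at the first hit, exactly like Python's lazy range)
def pvAInner (result : List Char) (c : Char) (i maxc : Int) : List Char :=
  if _h : i < maxc then
    if (result.length : Int) < i + 1 ∨ PySem.List.pyGet? result (-1 - i) ≠ some c then
      result ++ [c]
    else
      pvAInner result c (i + 1) maxc
  else
    result
termination_by (maxc - i).toNat
decreasing_by omega

def limit_consecutive_characters (input_str : String) (max_consec_chars : Int) : String :=
  String.mk (input_str.toList.foldl (fun result ch => pvAInner result ch 0 max_consec_chars) [])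

-- ===== PORT B =====
-- state = (out, prev, run): the output so far, the previous character, the capped current run length
def pvBStep (maxc : Int) (st : List Char × Option Char × Int) (ch : Char) : List Char × Option Char × Int :=
  let run : Int := if some ch = st.2.1 then st.2.2 else 0
  if run < maxc then (st.1 ++ [ch], some ch, run + 1) else (st.1, some ch, run)

def limit_consecutive_characters_alt (input_str : String) (max_consec_chars : Int) : String :=
  String.mk (input_str.toList.foldl (pvBStep max_consec_chars) ([], none, 0)).1

-- ===== PRECONDITION & SPEC =====
def Spec_limit_consecutive_characters (input_str : String) (max_consec_chars : Int) (out : String) : Prop := out = limit_consecutive_characters_alt input_str max_consec_chars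
instance (input_str : String) (max_consec_chars : Int) (out : String) : Decidable (Spec_limit_consecutive_characters input_str max_consec_chars out) := by unfold Spec_limit_consecutive_characters; infer_instance

-- ===== CLAIM (what is proved, stated in full; the proofs are below) =====
def Claim_equal_limit_consecutive_characters : Prop := ∀ (input_str : String) (max_consec_chars : Int), Dom_limit_consecutive_characters input_str max_consec_chars → Spec_limit_consecutive_characters input_str max_consec_chars (limit_consecutive_characters input_str max_consec_chars)

-- ===== LEMMAS AND PROOFS =====

-- trailing-run length: how many characters at the end of `res` are equal to `c`
def pvTC (res : List Char) (c : Char) : Nat := (res.reverse.takeWhile (· == c)).length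

theorem pvTCL_get_lt (r : List Char) (c : Char) (j : Nat)
    (h : j < (r.takeWhile (· == c)).length) : r[j]? = some c := by
  induction r generalizing j with
  | nil => simp at h
  | cons a r ih =>
    by_cases hac : a = c
    · subst hac
      simp only [List.takeWhile_cons, beq_self_eq_true, if_true, List.length_cons] at h
      cases j with
      | zero => simp
      | succ j => simpa using ih j (by omega)
    · simp [hac] at h

theorem pvTCL_get_eq (r : List Char) (c : Char)
    (h : (r.takeWhile (· == c)).length < r.length) :
    r[(r.takeWhile (· == c)).length]? ≠ some c := by
  induction r with
  | nil => simp at h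
  | cons a r ih =>
    by_cases hac : a = c
    · subst hac
      simp only [List.takeWhile_cons, beq_self_eq_true, if_true, List.length_cons] at h ⊢
      simpa using ih (by omega)
    · simp [hac]

theorem pvTC_le_length (res : List Char) (c : Char) : pvTC res c ≤ res.length := by
  have := List.takeWhile_sublist (p := fun x => x == c) (l := res.reverse)
  have := this.length_le
  simpa [pvTC] using this

theorem pvGet_rev (res : List Char) (j : Nat) (h : j < res.length) :
    PySem.List.pyGet? res (-1 - (j : Int)) = res.reverse[j]? := by
  have hk : (-1 - (j : Int)) = -(((j + 1 : Nat) : Int)) := by push_cast; ring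
  rw [hk, PySem.List.pyGet?_neg_natCast res (j + 1) (by omega) (by omega)]
  rw [List.getElem?_reverse h]
  congr 1
  omega

theorem pvTC_get_lt (res : List Char) (c : Char) (j : Nat) (h : j < pvTC res c) :
    PySem.List.pyGet? res (-1 - (j : Int)) = some c := by
  have hlen : j < res.length := by
    have := pvTC_le_length res c; omega
  rw [pvGet_rev res j hlen]
  exact pvTCL_get_lt res.reverse c j h

theorem pvTC_get_eq (res : List Char) (c : Char) (h : pvTC res c < res.length) :
    PySem.List.pyGet? res (-1 - (pvTC res c : Int)) ≠ some c := by
  rw [pvGet_rev res _ h]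
  exact pvTCL_get_eq res.reverse c (by simpa using h)

theorem pvTC_append_same (res : List Char) (c : Char) :
    pvTC (res ++ [c]) c = pvTC res c + 1 := by
  simp [pvTC]

theorem pvTC_of_head (res : List Char) (c p : Char) (hp : res.reverse.head? = some p)
    (h : p ≠ c) : pvTC res c = 0 := by
  unfold pvTC
  cases hr : res.reverse with
  | nil => simp [hr] at hp
  | cons a r => simp [hr] at hp; subst hp; simp [List.takeWhile_cons, h]

-- characterization of A's inner loop
theorem pvAInner_spec (res : List Char) (c : Char) (maxc : Int) (k : Nat)
    (hk : (k : Int) ≤ maxc) (htc : k ≤ pvTC res c) :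
    pvAInner res c (k : Int) maxc =
      if (pvTC res c : Int) < maxc then res ++ [c] else res := by
  by_cases hkm : (k : Int) < maxc
  · rw [pvAInner, dif_pos hkm]
    by_cases hkt : k < pvTC res c
    · have hget := pvTC_get_lt res c k hkt
      have hlen : (k : Nat) + 1 ≤ res.length := by
        have := pvTC_le_length res c; omega
      have hcond : ¬ ((res.length : Int) < (k : Int) + 1 ∨ PySem.List.pyGet? res (-1 - (k : Int)) ≠ some c) := by
        push_neg
        exact ⟨by push_cast; omega, hget⟩
      rw [if_neg hcond]
      have hrec := pvAInner_spec res c maxc (k + 1) (by push_cast; omega) (by omega)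
      simpa [Int.natCast_add] using hrec
    · have hkeq : k = pvTC res c := by omega
      subst hkeq
      have hcond : ((res.length : Int) < (pvTC res c : Int) + 1 ∨ PySem.List.pyGet? res (-1 - (pvTC res c : Int)) ≠ some c) := by
        by_cases hfull : pvTC res c < res.length
        · exact Or.inr (pvTC_get_eq res c hfull)
        · have := pvTC_le_length res c
          left; push_cast; omega
      rw [if_pos hcond, if_pos hkm]
  · rw [pvAInner, dif_neg hkm, if_neg (by omega)]
termination_by (maxc - k).toNat
decreasing_by omega

-- the invariant tying B's state to A's accumulator
def pvInv (maxc : Int) (st : List Char × Option Char × Int) : Prop :=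
  (st.2.1 = none → st.1 = [] ∧ st.2.2 = 0) ∧
  (∀ p, st.2.1 = some p →
    st.2.2 = (pvTC st.1 p : Int) ∧ st.2.2 ≤ maxc ∧ st.1.reverse.head? = some p ∧ 1 ≤ st.2.2)

theorem pv_step (maxc : Int) (hm : 0 < maxc) (st : List Char × Option Char × Int)
    (hinv : pvInv maxc st) (ch : Char) :
    pvInv maxc (pvBStep maxc st ch) ∧
      (pvBStep maxc st ch).1 = pvAInner st.1 ch 0 maxc := by
  obtain ⟨out, prev, run⟩ := st
  obtain ⟨hnone, hsome⟩ := hinv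
  have hA : pvAInner out ch 0 maxc =
      if (pvTC out ch : Int) < maxc then out ++ [ch] else out := by
    have := pvAInner_spec out ch maxc 0 (by omega) (by omega)
    simpa using this
  have htc : pvTC out ch = if some ch = prev then run.toNat else 0 := by
    match prev with
    | none =>
      obtain ⟨hout, _⟩ := hnone rfl
      simp only at hout
      subst hout
      simp [pvTC]
    | some p =>
      obtain ⟨hrun, _, hhead, _⟩ := hsome p rfl
      simp only at hrun hhead
      by_cases hch : ch = p
      · subst hch
        simp [hrun]
      · rw [if_neg (by simp [hch])]
        exact pvTC_of_head out ch p hhead (fun h => hch h.symm)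
  have hrun0 : (0 : Int) ≤ run := by
    match prev with
    | none => have := hnone rfl; simp only at this; omega
    | some p => have := hsome p rfl; simp only at this; omega
  have hruntc : (if some ch = prev then run else 0) = (pvTC out ch : Int) := by
    rw [htc]; split <;> simp <;> omega
  have htcle : (pvTC out ch : Int) ≤ maxc := by
    match prev with
    | none => rw [htc]; simp; omega
    | some p =>
      obtain ⟨hrun, hle, _, _⟩ := hsome p rfl
      simp only at hrun hle
      rw [htc]
      split <;> omega
  have hstep : pvBStep maxc (out, prev, run) ch =
      if (pvTC out ch : Int) < maxc
      then (out ++ [ch], some ch, (pvTC out ch : Int) + 1)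
      else (out, some ch, (pvTC out ch : Int)) := by
    simp only [pvBStep, hruntc]
  constructor
  · rw [hstep]
    split
    · refine ⟨by simp, ?_⟩
      intro q hq
      simp only [Option.some.injEq] at hq
      subst hq
      simp only
      refine ⟨?_, by omega, by simp, by omega⟩
      rw [pvTC_append_same]
      push_cast
      omega
    · refine ⟨by simp, ?_⟩
      intro q hq
      simp only [Option.some.injEq] at hq
      subst hq
      simp only
      have h1 : 1 ≤ pvTC out ch := by omega
      have hhd : out.reverse.head? = some ch := by
        have := pvTC_get_lt out ch 0 (by omega)
        have hlen : 0 < out.length := by have := pvTC_le_length out ch; omega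
        rw [pvGet_rev out 0 hlen] at this
        rwa [List.head?_eq_getElem?]
      refine ⟨?_, ?_, hhd, ?_⟩ <;> first | trivial | omega
  · rw [hstep, hA]
    split <;> simp

theorem pv_fold (maxc : Int) (hm : 0 < maxc) (l : List Char)
    (st : List Char × Option Char × Int) (hinv : pvInv maxc st) :
    (l.foldl (pvBStep maxc) st).1 =
      l.foldl (fun result ch => pvAInner result ch 0 maxc) st.1 := by
  induction l generalizing st with
  | nil => rfl
  | cons a l ih =>
    have h := pv_step maxc hm st hinv a
    simp only [List.foldl_cons]
    rw [ih (pvBStep maxc st a) h.1, h.2]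

theorem pv_nonpos (maxc : Int) (hm : maxc ≤ 0) (l : List Char)
    (st : List Char × Option Char × Int) (hrun : 0 ≤ st.2.2) :
    (l.foldl (pvBStep maxc) st).1 = st.1 ∧
      l.foldl (fun result ch => pvAInner result ch 0 maxc) st.1 = st.1 := by
  induction l generalizing st with
  | nil => exact ⟨rfl, rfl⟩
  | cons a l ih =>
    obtain ⟨out, prev, run⟩ := st
    simp only at hrun
    have hAstep : pvAInner out a 0 maxc = out := by
      rw [pvAInner, dif_neg (by omega)]
    have hBstep : pvBStep maxc (out, prev, run) a =
        (out, some a, if some a = prev then run else 0) := by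
      simp only [pvBStep]
      rw [if_neg]
      split <;> omega
    simp only [List.foldl_cons, hBstep, hAstep]
    have := ih (out, some a, if some a = prev then run else 0)
      (by simp only; split <;> omega)
    simpa using this

-- ===== VERDICT (by name: the statement is the Claim_ definition above) =====
theorem limit_consecutive_characters_spec : Claim_equal_limit_consecutive_characters := by
  intro s maxc _
  unfold Spec_limit_consecutive_characters limit_consecutive_characters limit_consecutive_characters_alt
  by_cases hm : 0 < maxc
  · rw [pv_fold maxc hm s.toList ([], none, 0) (by simp [pvInv])]
  · have h := pv_nonpos maxc (by omega) s.toList ([], none, 0) (by simp)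
    rw [h.1, h.2]
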